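-- pv_equiv track=rewrite | github.com/baptiste-pasquier/crypto_SPN | cipherfour.py | filtreboiteactive
-- ===== SOURCE A (Python) =====
-- def boiteactive(a):
--     """
--     Input : Différence (16-bit integer)
--     Ouput : Liste des boites activées par cette différence
--     """
--     resul = [False, False, False, False]
--     for i in range(0, 4):
--         if ((a >> (i * 4)) & 0xF) > 0:
--             resul[3 - i] = True
--     return resul
--
-- def filtreboiteactive(a, listeboitesactives):
--     """  Filtrage sur les boites actives
--     Input : différence (16bit), Bool list
--     Output : True si les boites actives demandées sont actives dans la différence
--     """
--     wanted = listeboitesactives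
--     current = boiteactive(a)
--     for i in range(0, 4):
--         if wanted[i] is True:
--             if current[i] is False:
--                 return False
--     return True
-- ===== SOURCE B (Python) =====
-- def filtreboiteactive(a, listeboitesactives):
--     """Filtrage sur les boites actives.
--     Scans the 16-bit difference as a stream of base-16 digits, most significant
--     first: repeatedly split off the top digit with divmod and shift the rest up.
--     No bitwise ops, no activity table."""
--     x = a % 65536
--     for w in listeboitesactives[:4]:
--         d, r = divmod(x, 4096)
--         if w is True and d == 0:
--             return False
--         x = r * 16
--     return True
-- ===== Notes on version B (the rewrite author's own statement) =====
-- stated objective: alternative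
-- what changed: B discards A's bitwise activity table (boiteactive's shift/mask loop plus a second scan): it reduces the difference mod 65536 and streams its four base-16 digits most-significant-first with divmod over the truncated wanted list, rejecting as soon as a requested digit is zero — no bit operations and no intermediate list.
import Mathlib
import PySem

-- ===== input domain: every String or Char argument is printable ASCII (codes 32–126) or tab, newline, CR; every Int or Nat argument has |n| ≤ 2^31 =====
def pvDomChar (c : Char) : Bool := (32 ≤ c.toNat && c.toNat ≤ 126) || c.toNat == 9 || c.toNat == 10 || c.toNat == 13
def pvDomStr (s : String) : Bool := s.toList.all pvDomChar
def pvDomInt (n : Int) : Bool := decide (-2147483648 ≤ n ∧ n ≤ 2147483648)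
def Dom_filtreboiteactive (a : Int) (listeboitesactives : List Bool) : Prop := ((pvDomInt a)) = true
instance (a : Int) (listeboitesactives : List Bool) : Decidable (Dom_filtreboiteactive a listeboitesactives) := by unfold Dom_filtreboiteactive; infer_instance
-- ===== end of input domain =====

-- B replaces A's bitwise activity table by a divmod stream of the difference's base-16 digits,
-- most significant first, over the truncated wanted list (objective: alternative, no bit ops, no table).

-- ===== PORT A =====
-- helper boiteactive: builds the 4-entry activity list exactly as A does
def boiteactiveA (a : Int) : List Bool :=
  (PySem.List.pyRange 0 4 1).foldl
    (fun resul i =>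
      if PySem.Int.band (a >>> (i * 4)) 0xF > 0 then resul.set (3 - i).toNat true else resul)
    [false, false, false, false]

-- the for-loop of filtreboiteactive with its early return (i runs 0..3); a missing index
-- (wanted shorter than the loop needs) is the IndexError case excluded by Pre_
def pvLoopA (wanted current : List Bool) (i : Nat) : Nat → Bool
  | 0 => true
  | fuel + 1 =>
    if PySem.List.pyGetD wanted (i : Int) false = true then
      if PySem.List.pyGetD current (i : Int) false = false then false
      else pvLoopA wanted current (i + 1) fuel
    else pvLoopA wanted current (i + 1) fuel

def filtreboiteactive (a : Int) (listeboitesactives : List Bool) : Bool :=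
  let wanted := listeboitesactives
  let current := boiteactiveA a
  pvLoopA wanted current 0 4

-- ===== PORT B =====
-- the for-loop of Source B: each step splits off the top base-16 digit with divmod (divisor 4096 ≠ 0,
-- so divmod is floordiv/mod) and shifts the remainder up one digit
def pvLoopB : Int → List Bool → Bool
  | _, [] => true
  | x, w :: ws =>
    let d := PySem.Int.floordiv x 4096
    let r := PySem.Int.mod x 4096
    if w = true ∧ d = 0 then false
    else pvLoopB (r * 16) ws

def filtreboiteactive_alt (a : Int) (listeboitesactives : List Bool) : Bool :=
  pvLoopB (PySem.Int.mod a 65536) (PySem.List.slice listeboitesactives none (some 4))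

-- ===== PRECONDITION & SPEC =====
-- Pre_ excludes exactly the inputs where Python A raises IndexError: lists shorter than 4 on
-- which the loop reaches an out-of-range index before any early `return False`.
def Pre_filtreboiteactive (a : Int) (listeboitesactives : List Bool) : Prop :=
  4 ≤ listeboitesactives.length ∨
  ∃ i < min 4 listeboitesactives.length,
    listeboitesactives.getD i false = true ∧ PySem.Int.band (a >>> (((3:Int) - (i:Int)) * 4)) 0xF = 0
instance (a : Int) (listeboitesactives : List Bool) : Decidable (Pre_filtreboiteactive a listeboitesactives) := by unfold Pre_filtreboiteactive; infer_instance
def pvWitness_filtreboiteactive : Int × List Bool := (0x1234, [true, false, true, false])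
def Spec_filtreboiteactive (a : Int) (listeboitesactives : List Bool) (out : Bool) : Prop := out = filtreboiteactive_alt a listeboitesactives
instance (a : Int) (listeboitesactives : List Bool) (out : Bool) : Decidable (Spec_filtreboiteactive a listeboitesactives out) := by unfold Spec_filtreboiteactive; infer_instance

-- ===== CLAIM (what is proved, stated in full; the proofs are below) =====
def Claim_equal_filtreboiteactive : Prop := ∀ (a : Int) (listeboitesactives : List Bool), Dom_filtreboiteactive a listeboitesactives → Pre_filtreboiteactive a listeboitesactives → Spec_filtreboiteactive a listeboitesactives (filtreboiteactive a listeboitesactives)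

-- ===== LEMMAS AND PROOFS =====
theorem pv_pyRange04 : PySem.List.pyRange 0 4 1 = [0, 1, 2, 3] := by decide

-- Int '>>>' with an Int shift amount is floor division by the power of two (Python-exact)
theorem pv_shr (a : Int) (n : Nat) : a >>> ((n : Nat) : Int) = a / 2 ^ n := by
  rw [Int.shiftRight_natCast_right, Int.shiftRight_eq_div_pow]
  norm_num

-- masking with 15 is mod 16 (Python-exact on negatives)
theorem pv_band15 (a : Int) : PySem.Int.band a 15 = a % 16 := by
  unfold PySem.Int.band
  split_ifs with h1 h2 h2
  · rw [show ((15:Int)).toNat = 15 from rfl, show (15:Nat) = 2^4-1 from rfl,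
      Nat.and_two_pow_sub_one_eq_mod a.toNat 4]
    omega
  · omega
  · rw [show ((15:Int)).toNat = 15 from rfl, Nat.and_comm, show (15:Nat) = 2^4-1 from rfl,
      Nat.and_two_pow_sub_one_eq_mod]
    have h3 := Nat.mod_lt (-a-1).toNat (show 0 < 2^4 by norm_num)
    have h5 : ((-a-1).toNat % 2^4 : Nat) = ((-a-1) % 16).toNat := by omega
    omega
  · omega

-- the four nibbles A masks out are exactly the four digits B's divmod stream produces
theorem pv_dig12 (a : Int) : PySem.Int.band (a >>> (12:Int)) 15 = a % 65536 / 4096 := by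
  rw [show (12:Int) = ((12:Nat):Int) from by norm_num, pv_shr, pv_band15]
  omega

theorem pv_dig8 (a : Int) :
    PySem.Int.band (a >>> (8:Int)) 15 = a % 4096 * 16 / 4096 := by
  rw [show (8:Int) = ((8:Nat):Int) from by norm_num, pv_shr, pv_band15]
  omega

theorem pv_dig4 (a : Int) :
    PySem.Int.band (a >>> (4:Int)) 15 = a % 4096 * 16 % 4096 * 16 / 4096 := by
  rw [show (4:Int) = ((4:Nat):Int) from by norm_num, pv_shr, pv_band15]
  omega

theorem pv_dig0 (a : Int) :
    PySem.Int.band (a >>> (0:Int)) 15 = a % 4096 * 16 % 4096 * 16 % 4096 * 16 / 4096 := by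
  rw [show (0:Int) = ((0:Nat):Int) from by norm_num, pv_shr, pv_band15]
  omega

theorem pv_cur (a : Int) :
    boiteactiveA a =
      [decide (0 < a % 65536 / 4096),
       decide (0 < a % 4096 * 16 / 4096),
       decide (0 < a % 4096 * 16 % 4096 * 16 / 4096),
       decide (0 < a % 4096 * 16 % 4096 * 16 % 4096 * 16 / 4096)] := by
  have e12 := pv_dig12 a
  have e8 := pv_dig8 a
  have e4 := pv_dig4 a
  have e0 := pv_dig0 a
  simp only [boiteactiveA, pv_pyRange04]
  norm_num [List.foldl]
  split_ifs <;> simp_all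

theorem pv_slice4 (xs : List Bool) : PySem.List.slice xs none (some 4) = xs.take 4 := by
  rw [show (4:Int) = ((4:Nat):Int) from by norm_num, PySem.List.slice_to_natCast]

set_option maxHeartbeats 1600000 in
theorem ports_agree (a : Int) (l : List Bool) (hp : Pre_filtreboiteactive a l) :
    filtreboiteactive a l = filtreboiteactive_alt a l := by
  have hm : PySem.Int.mod a 65536 = a % 65536 :=
    PySem.Int.mod_eq_emod_of_pos (by norm_num)
  have n0 : 0 ≤ a % 65536 / 4096 := by omega
  have n1 : 0 ≤ a % 4096 * 16 / 4096 := by omega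
  have n2 : 0 ≤ a % 4096 * 16 % 4096 * 16 / 4096 := by omega
  have n3 : 0 ≤ a % 4096 * 16 % 4096 * 16 % 4096 * 16 / 4096 := by omega
  have r0 : ((a % 65536 / 4096 = 0)) ↔ ¬ 0 < a % 65536 / 4096 := by omega
  have r1 : ((a % 4096 * 16 / 4096 = 0)) ↔ ¬ 0 < a % 4096 * 16 / 4096 := by omega
  have r2 : ((a % 4096 * 16 % 4096 * 16 / 4096 = 0)) ↔ ¬ 0 < a % 4096 * 16 % 4096 * 16 / 4096 := by omega
  have r3 : ((a % 4096 * 16 % 4096 * 16 % 4096 * 16 / 4096 = 0)) ↔ ¬ 0 < a % 4096 * 16 % 4096 * 16 % 4096 * 16 / 4096 := by omega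
  simp only [filtreboiteactive, filtreboiteactive_alt, pv_cur, pv_slice4, hm]
  match l with
  | [] =>
      exfalso
      rcases hp with h | ⟨i, hi, _⟩
      · simp at h
      · simp at hi
  | [b0] =>
      rcases hp with h | ⟨i, hi, hw, hz⟩
      · simp at h
      · have hi0 : i = 0 := by simp at hi; omega
        subst hi0
        norm_num at hz hw
        rw [pv_dig12] at hz
        subst hw
        simp only [pvLoopA, pvLoopB, PySem.List.pyGetD_natCast, List.take,
          PySem.Int.floordiv_eq_ediv_of_pos (show (0:Int) < 4096 by norm_num),
          PySem.Int.mod_eq_emod_of_pos (show (0:Int) < 4096 by norm_num)]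
        norm_num
        simp [r0, hz]
  | [b0, b1] =>
      rcases hp with h | ⟨i, hi, hw, hz⟩
      · simp at h
      · have hi2 : i = 0 ∨ i = 1 := by simp at hi; omega
        simp only [pvLoopA, pvLoopB, PySem.List.pyGetD_natCast, List.take,
          PySem.Int.floordiv_eq_ediv_of_pos (show (0:Int) < 4096 by norm_num),
          PySem.Int.mod_eq_emod_of_pos (show (0:Int) < 4096 by norm_num)]
        norm_num
        simp only [r0, r1]
        rcases hi2 with rfl | rfl
        all_goals norm_num at hz hw
        · rw [pv_dig12] at hz
          subst hw
          by_cases h1 : 0 < a % 4096 * 16 / 4096 <;>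
          cases b1 <;> simp [hz, h1]
        · rw [pv_dig8] at hz
          subst hw
          by_cases h0 : 0 < a % 65536 / 4096 <;>
          cases b0 <;> simp [hz, h0]
  | [b0, b1, b2] =>
      rcases hp with h | ⟨i, hi, hw, hz⟩
      · simp at h
      · have hi3 : i = 0 ∨ i = 1 ∨ i = 2 := by simp at hi; omega
        simp only [pvLoopA, pvLoopB, PySem.List.pyGetD_natCast, List.take,
          PySem.Int.floordiv_eq_ediv_of_pos (show (0:Int) < 4096 by norm_num),
          PySem.Int.mod_eq_emod_of_pos (show (0:Int) < 4096 by norm_num)]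
        norm_num
        simp only [r0, r1, r2]
        rcases hi3 with rfl | rfl | rfl
        all_goals norm_num at hz hw
        · rw [pv_dig12] at hz
          subst hw
          by_cases h1 : 0 < a % 4096 * 16 / 4096 <;>
          by_cases h2 : 0 < a % 4096 * 16 % 4096 * 16 / 4096 <;>
          cases b1 <;> cases b2 <;> simp [hz, h1, h2]
        · rw [pv_dig8] at hz
          subst hw
          by_cases h0 : 0 < a % 65536 / 4096 <;>
          by_cases h2 : 0 < a % 4096 * 16 % 4096 * 16 / 4096 <;>
          cases b0 <;> cases b2 <;> simp [hz, h0, h2]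
        · rw [pv_dig4] at hz
          subst hw
          by_cases h0 : 0 < a % 65536 / 4096 <;>
          by_cases h1 : 0 < a % 4096 * 16 / 4096 <;>
          cases b0 <;> cases b1 <;> simp [hz, h0, h1]
  | b0 :: b1 :: b2 :: b3 :: t =>
      simp only [pvLoopA, pvLoopB, PySem.List.pyGetD_natCast, List.take,
        PySem.Int.floordiv_eq_ediv_of_pos (show (0:Int) < 4096 by norm_num),
        PySem.Int.mod_eq_emod_of_pos (show (0:Int) < 4096 by norm_num)]
      norm_num
      simp only [r0, r1, r2, r3]
      by_cases h0 : 0 < a % 65536 / 4096 <;>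
      by_cases h1 : 0 < a % 4096 * 16 / 4096 <;>
      by_cases h2 : 0 < a % 4096 * 16 % 4096 * 16 / 4096 <;>
      by_cases h3 : 0 < a % 4096 * 16 % 4096 * 16 % 4096 * 16 / 4096 <;>
      cases b0 <;> cases b1 <;> cases b2 <;> cases b3 <;>
        simp [h0, h1, h2, h3] <;> omega

-- ===== VERDICT (by name: the statement is the Claim_ definition above) =====
theorem filtreboiteactive_spec : Claim_equal_filtreboiteactive := by
  intro a l _ hp
  exact ports_agree a l hp
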